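-- pv_equiv track=rewrite | github.com/Ankit-29/competitive_programming | Matrix/vestigium.py | vestigium
-- ===== SOURCE A (Python) =====
-- from typing import List
--
-- def vestigium(mat: List[int],n: int)->List[int]:
--     HashRow = {}; HashCol = {}; repeatRow = 0; repeatCol=0; trace = 0
--     for x in range(n):
--         HashRow[x] = {}
--         for y in range(n):
--             if(y not in HashCol):
--                 HashCol[y] = {}
--             trace += mat[x][y] if x==y else 0
--
--             if('-1' not in HashRow[x] and mat[x][y] in HashRow[x]):
--                 repeatRow += 1
--                 HashRow[x]['-1'] = 1
--             else:
--                 HashRow[x][mat[x][y]] = 1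
--
--             if('-1' not in HashCol[y] and mat[x][y] in HashCol[y]):
--                 repeatCol += 1
--                 HashCol[y]['-1'] = 1
--             else:
--                 HashCol[y][mat[x][y]] = 1
--
--     return [trace,repeatRow,repeatCol]
-- ===== SOURCE B (Python) =====
-- from typing import List
--
-- def vestigium(mat: List[int], n: int) -> List[int]:
--     trace = sum(mat[i][i] for i in range(n))
--     repeatRow = sum(1 for x in range(n) if len({mat[x][y] for y in range(n)}) < n)
--     repeatCol = sum(1 for y in range(n) if len({mat[x][y] for x in range(n)}) < n)
--     return [trace, repeatRow, repeatCol]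
-- ===== Notes on version B (the rewrite author's own statement) =====
-- stated objective: simpler
-- what changed: Replaces the sentinel-keyed dict-of-dicts bookkeeping with three independent passes: a direct diagonal sum for the trace and, per row/column, a set of its first n entries whose size being < n detects a duplicate.
import Mathlib
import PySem

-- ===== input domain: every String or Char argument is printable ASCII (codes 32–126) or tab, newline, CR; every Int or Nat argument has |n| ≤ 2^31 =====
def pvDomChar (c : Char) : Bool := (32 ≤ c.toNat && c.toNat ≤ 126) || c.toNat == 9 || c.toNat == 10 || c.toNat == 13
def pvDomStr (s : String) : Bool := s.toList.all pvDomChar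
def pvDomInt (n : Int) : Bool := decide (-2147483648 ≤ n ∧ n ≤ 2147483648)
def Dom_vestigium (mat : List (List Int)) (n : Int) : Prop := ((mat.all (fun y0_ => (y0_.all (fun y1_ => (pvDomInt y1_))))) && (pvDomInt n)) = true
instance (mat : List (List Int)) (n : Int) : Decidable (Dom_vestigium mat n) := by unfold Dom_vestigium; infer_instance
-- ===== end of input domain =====

-- B replaces A's sentinel-keyed dict-of-dicts bookkeeping with a diagonal sum and per-row/per-column
-- duplicate detection via the size of the set of the first n entries (objective: simpler).

-- ===== PORT A =====
-- inner dicts of A mix int keys with the string key '-1'; modeled as `Option Int` with `none` for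
-- the sentinel '-1' (exact: in Python an int key never equals a str key, so the two never collide)
abbrev VInner := PySem.Dict (Option Int) Int

-- mat[x][y]; exact under Pre_vestigium (both indices are in range there, the default is never used)
def vCell (mat : List (List Int)) (x y : Int) : Int :=
  PySem.List.pyGetD (PySem.List.pyGetD mat x []) y 0

-- the if/else block A performs twice per cell (once on HashRow[x], once on HashCol[y]):
-- dict d plus repeat counter c, processing value v
def vMark (d : VInner) (c : Int) (v : Int) : VInner × Int :=
  if d.contains none = false ∧ d.contains (some v) = true then (d.insert none 1, c + 1)
  else (d.insert (some v) 1, c)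

structure VSt where
  hr : PySem.Dict Int VInner
  hc : PySem.Dict Int VInner
  rr : Int
  rc : Int
  tr : Int

-- body of the inner `for y in range(n)` loop; HashRow[x]/HashCol[y] are read with getD .empty,
-- exact because both keys are always present at the point Python reads them
def vInnerStep (mat : List (List Int)) (x : Int) (st : VSt) (y : Int) : VSt :=
  let hc := if st.hc.contains y then st.hc else st.hc.insert y PySem.Dict.empty
  let tr := st.tr + (if x = y then vCell mat x y else 0)
  let pr := vMark (st.hr.getD x PySem.Dict.empty) st.rr (vCell mat x y)
  let pc := vMark (hc.getD y PySem.Dict.empty) st.rc (vCell mat x y)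
  ⟨st.hr.insert x pr.1, hc.insert y pc.1, pr.2, pc.2, tr⟩

-- body of the outer `for x in range(n)` loop: HashRow[x] = {} then the inner loop
def vRowStep (mat : List (List Int)) (n : Int) (st : VSt) (x : Int) : VSt :=
  (PySem.List.pyRange 0 n 1).foldl (vInnerStep mat x) { st with hr := st.hr.insert x PySem.Dict.empty }

def vestigium (mat : List (List Int)) (n : Int) : List Int :=
  let st := (PySem.List.pyRange 0 n 1).foldl (vRowStep mat n) ⟨PySem.Dict.empty, PySem.Dict.empty, 0, 0, 0⟩
  [st.tr, st.rr, st.rc]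

-- ===== PORT B =====
def vestigium_alt (mat : List (List Int)) (n : Int) : List Int :=
  let trace := ((PySem.List.pyRange 0 n 1).map (fun i => vCell mat i i)).sum
  let repeatRow := ((PySem.List.pyRange 0 n 1).map (fun x =>
    if PySem.Set.len (PySem.Set.ofList ((PySem.List.pyRange 0 n 1).map (fun y => vCell mat x y))) < n
    then (1 : Int) else 0)).sum
  let repeatCol := ((PySem.List.pyRange 0 n 1).map (fun y =>
    if PySem.Set.len (PySem.Set.ofList ((PySem.List.pyRange 0 n 1).map (fun x => vCell mat x y))) < n
    then (1 : Int) else 0)).sum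
  [trace, repeatRow, repeatCol]

-- ===== PRECONDITION & SPEC =====
-- A raises IndexError when n exceeds the number of rows or one of the first n rows has fewer
-- than n entries; Pre_ admits exactly the inputs on which A returns.
def Pre_vestigium (mat : List (List Int)) (n : Int) : Prop :=
  n ≤ (mat.length : Int) ∧ ∀ row ∈ mat.take n.toNat, n ≤ (row.length : Int)
instance (mat : List (List Int)) (n : Int) : Decidable (Pre_vestigium mat n) := by
  unfold Pre_vestigium; infer_instance

def pvWitness_vestigium : List (List Int) × Int := ([[1, 1], [1, 2]], 2)

def Spec_vestigium (mat : List (List Int)) (n : Int) (out : List Int) : Prop := out = vestigium_alt mat n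
instance (mat : List (List Int)) (n : Int) (out : List Int) : Decidable (Spec_vestigium mat n out) := by
  unfold Spec_vestigium; infer_instance

-- ===== CLAIM (what is proved, stated in full; the proofs are below) =====
def Claim_equal_vestigium : Prop := ∀ (mat : List (List Int)) (n : Int), Dom_vestigium mat n → Pre_vestigium mat n → Spec_vestigium mat n (vestigium mat n)

-- ===== LEMMAS AND PROOFS =====

-- duplicate indicator of a list, as the Int that A's counters add
def vInd (l : List Int) : Int := if l.Nodup then 0 else 1

-- first m entries of row x / first k entries of column y
def vRow (mat : List (List Int)) (x m : Nat) : List Int :=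
  (List.range m).map (fun y : Nat => vCell mat (x : Int) (y : Int))
def vCol (mat : List (List Int)) (y k : Nat) : List Int :=
  (List.range k).map (fun x : Nat => vCell mat (x : Int) (y : Int))

-- an inner dict represents the list of already-processed values l
def vRepr (d : VInner) (l : List Int) : Prop :=
  d.contains none = !decide l.Nodup ∧ ∀ v : Int, d.contains (some v) = decide (v ∈ l)

theorem vRepr_empty : vRepr PySem.Dict.empty [] := by
  refine ⟨by simp [PySem.Dict.contains_empty], fun v => by simp [PySem.Dict.contains_empty]⟩

theorem vMark_spec (d : VInner) (c v : Int) (l : List Int) (h : vRepr d l) :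
    vRepr (vMark d c v).1 (l ++ [v]) ∧ (vMark d c v).2 = c + vInd (l ++ [v]) - vInd l := by
  obtain ⟨hs, hv⟩ := h
  have hnd : (l ++ [v]).Nodup ↔ l.Nodup ∧ v ∉ l := by
    rw [← List.concat_eq_append, List.nodup_concat]; tauto
  unfold vMark vInd
  by_cases h1 : d.contains none = false ∧ d.contains (some v) = true
  · -- duplicate found for the first time in this row/column
    have hl : l.Nodup := by
      by_contra hc; rw [hs] at h1; simp [hc] at h1
    have hm : v ∈ l := by
      have := h1.2; rw [hv] at this; simpa using this
    have hnd' : ¬ (l ++ [v]).Nodup := by rw [hnd]; tauto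
    rw [if_pos h1]
    refine ⟨⟨?_, ?_⟩, ?_⟩
    · rw [PySem.Dict.contains_insert]; simp [hnd']
    · intro w
      rw [PySem.Dict.contains_insert]
      simp only [show ((some w == (none : Option Int)) = false) from rfl, Bool.false_or]
      rw [hv w]
      by_cases hw : w = v
      · subst hw; simp [hm]
      · simp [List.mem_append, hw]
    · simp [hnd', hl]
  · rw [if_neg h1]
    have key : ¬ l.Nodup ∨ v ∉ l := by
      by_cases hsn : l.Nodup
      · right; intro hm
        exact h1 ⟨by rw [hs]; simp [hsn], by rw [hv]; simpa using hm⟩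
      · left; exact hsn
    refine ⟨⟨?_, ?_⟩, ?_⟩
    · rw [PySem.Dict.contains_insert]
      simp only [show (((none : Option Int) == some v) = false) from rfl, Bool.false_or]
      rw [hs]
      rcases key with hk | hk
      · have : ¬ (l ++ [v]).Nodup := by rw [hnd]; tauto
        simp [hk, this]
      · have : (l ++ [v]).Nodup ↔ l.Nodup := by rw [hnd]; tauto
        simp [this]
    · intro w
      rw [PySem.Dict.contains_insert, hv w]
      by_cases hw : w = v
      · subst hw; simp
      · simp [hw, List.mem_append]
    · rcases key with hk | hk
      · have : ¬ (l ++ [v]).Nodup := by rw [hnd]; tauto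
        simp [hk, this]
      · rcases Decidable.em l.Nodup with hl | hl
        · have : (l ++ [v]).Nodup := hnd.mpr ⟨hl, hk⟩
          simp [this, hl]
        · have : ¬ (l ++ [v]).Nodup := by rw [hnd]; tauto
          simp [this, hl]

-- moving the split point of a prefix-threshold sum one step up
theorem sum_range_if_succ (N y : Nat) (hy : y < N) (f g : Nat → Int) :
    ((List.range N).map (fun j => if j < y + 1 then f j else g j)).sum
      = ((List.range N).map (fun j => if j < y then f j else g j)).sum + f y - g y := by
  induction N with
  | zero => omega
  | succ N ih =>
    rw [List.range_succ, List.map_append, List.map_append, List.sum_append, List.sum_append]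
    rcases Nat.lt_or_ge y N with h | h
    · have heq : ((([N]).map (fun j => if j < y + 1 then f j else g j)).sum : Int)
               = (([N]).map (fun j => if j < y then f j else g j)).sum := by
        simp only [List.map_cons, List.map_nil, List.sum_cons, List.sum_nil]
        rw [if_neg (by omega), if_neg (by omega)]
      rw [ih h, heq]
      ring
    · have hyN : y = N := by omega
      subst hyN
      have hpre : ((List.range y).map (fun j => if j < y + 1 then f j else g j)).sum
          = ((List.range y).map (fun j => if j < y then f j else g j)).sum := by
        apply congrArg
        apply List.map_congr_left
        intro j hj
        rw [List.mem_range] at hj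
        rw [if_pos (show j < y + 1 by omega), if_pos hj]
      have hL : ((([y]).map (fun j => if j < y + 1 then f j else g j)).sum : Int) = f y := by
        simp only [List.map_cons, List.map_nil, List.sum_cons, List.sum_nil]
        rw [if_pos (by omega)]
        ring
      have hR : ((([y]).map (fun j => if j < y then f j else g j)).sum : Int) = g y := by
        simp only [List.map_cons, List.map_nil, List.sum_cons, List.sum_nil]
        rw [if_neg (by omega)]
        ring
      rw [hpre, hL, hR]
      ring

-- invariant between full rows: the first x rows are fully processed
def vInvR (mat : List (List Int)) (N : Nat) (st : VSt) (x : Nat) : Prop :=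
  st.tr = ((List.range x).map (fun i : Nat => vCell mat (i : Int) (i : Int))).sum ∧
  st.rr = ((List.range x).map (fun i => vInd (vRow mat i N))).sum ∧
  st.rc = ((List.range N).map (fun j => vInd (vCol mat j x))).sum ∧
  ∀ j, j < N → vRepr (st.hc.getD (j : Int) PySem.Dict.empty) (vCol mat j x)

-- invariant inside row x: y cells of row x processed on top of x full rows
def vInv (mat : List (List Int)) (N : Nat) (st : VSt) (x y : Nat) : Prop :=
  st.tr = ((List.range x).map (fun i : Nat => vCell mat (i : Int) (i : Int))).sum
            + (if x < y then vCell mat (x : Int) (x : Int) else 0) ∧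
  st.rr = ((List.range x).map (fun i => vInd (vRow mat i N))).sum + vInd (vRow mat x y) ∧
  st.rc = ((List.range N).map (fun j => if j < y then vInd (vCol mat j (x + 1)) else vInd (vCol mat j x))).sum ∧
  vRepr (st.hr.getD (x : Int) PySem.Dict.empty) (vRow mat x y) ∧
  ∀ j, j < N → vRepr (st.hc.getD (j : Int) PySem.Dict.empty) (vCol mat j (if j < y then x + 1 else x))

theorem vInnerStep_inv (mat : List (List Int)) (N x y : Nat) (st : VSt)
    (hy : y < N) (h : vInv mat N st x y) :
    vInv mat N (vInnerStep mat (x : Int) st (y : Int)) x (y + 1) := by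
  obtain ⟨htr, hrr, hrc, hhr, hhc⟩ := h
  have hcget : ∀ j : Int,
      ((if st.hc.contains (y : Int) then st.hc else st.hc.insert (y : Int) PySem.Dict.empty).getD j PySem.Dict.empty)
        = st.hc.getD j PySem.Dict.empty := by
    intro j
    by_cases hcy : st.hc.contains (y : Int)
    · rw [if_pos hcy]
    · rw [if_neg hcy]
      by_cases hj : j = (y : Int)
      · subst hj
        rw [PySem.Dict.getD_insert_self,
            PySem.Dict.getD_of_not_contains _ _ (by simpa using hcy)]
      · rw [PySem.Dict.getD_insert_of_ne _ _ _ hj]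
  have hrowext : vRow mat x (y + 1) = vRow mat x y ++ [vCell mat (x : Int) (y : Int)] := by
    simp [vRow, List.range_succ]
  have hcolext : vCol mat y (x + 1) = vCol mat y x ++ [vCell mat (x : Int) (y : Int)] := by
    simp [vCol, List.range_succ]
  have hmr := vMark_spec (st.hr.getD (x : Int) PySem.Dict.empty) st.rr (vCell mat (x : Int) (y : Int)) (vRow mat x y) hhr
  have hmc := vMark_spec (st.hc.getD (y : Int) PySem.Dict.empty) st.rc (vCell mat (x : Int) (y : Int)) (vCol mat y x)
      (by have := hhc y hy; rwa [if_neg (by omega)] at this)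
  unfold vInv vInnerStep
  simp only [hcget]
  refine ⟨?_, ?_, ?_, ?_, ?_⟩
  · -- trace
    rw [htr]
    by_cases hxy : x = y
    · subst hxy
      rw [if_pos (rfl : (x : Int) = (x : Int)), if_neg (show ¬ x < x by omega),
          if_pos (show x < x + 1 by omega)]
      ring
    · have e2 : (if x < y then vCell mat (x : Int) (x : Int) else 0)
           = (if x < y + 1 then vCell mat (x : Int) (x : Int) else 0) := by
        by_cases h' : x < y
        · rw [if_pos h', if_pos (show x < y + 1 by omega)]
        · rw [if_neg h', if_neg (show ¬ x < y + 1 by omega)]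
      rw [if_neg (show ¬ (x : Int) = (y : Int) by exact_mod_cast hxy), e2]
      ring
  · -- repeatRow
    rw [hmr.2, hrr, hrowext]
    try ring
  · -- repeatCol
    rw [hmc.2, hrc, sum_range_if_succ N y hy, hcolext]
    try ring
  · -- HashRow[x] represents the extended row prefix
    rw [PySem.Dict.getD_insert_self, hrowext]
    exact hmr.1
  · -- HashCol[j] for every column j
    intro j hj
    by_cases hjy : j = y
    · subst hjy
      rw [PySem.Dict.getD_insert_self, if_pos (Nat.lt_succ_self _), hcolext]
      exact hmc.1
    · rw [PySem.Dict.getD_insert_of_ne _ _ _ (show (j : Int) ≠ (y : Int) by exact_mod_cast hjy), hcget]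
      have h5 := hhc j hj
      have e : (if j < y + 1 then x + 1 else x) = (if j < y then x + 1 else x) := by
        by_cases hlt : j < y
        · rw [if_pos (show j < y + 1 by omega), if_pos hlt]
        · rw [if_neg (show ¬ j < y + 1 by omega), if_neg hlt]
      rw [e]
      exact h5

theorem vInner_fold (mat : List (List Int)) (N x : Nat) :
    ∀ (k y : Nat) (st : VSt), y + k = N → vInv mat N st x y →
      vInv mat N (((List.range' y k).map (fun j : Nat => (j : Int))).foldl (vInnerStep mat (x : Int)) st) x N := by
  intro k
  induction k with
  | zero =>
    intro y st hyk hinv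
    have : y = N := by omega
    subst this
    simpa using hinv
  | succ k ih =>
    intro y st hyk hinv
    rw [List.range'_succ, List.map_cons, List.foldl_cons]
    exact ih (y + 1) _ (by omega) (vInnerStep_inv mat N x y st (by omega) hinv)

theorem vRowStep_inv (mat : List (List Int)) (n : Int) (N x : Nat) (st : VSt)
    (hN : N = n.toNat) (hx : x < N) (h : vInvR mat N st x) :
    vInvR mat N (vRowStep mat n st (x : Int)) (x + 1) := by
  obtain ⟨htr, hrr, hrc, hhc⟩ := h
  have hstart : vInv mat N { st with hr := st.hr.insert (x : Int) PySem.Dict.empty } x 0 := by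
    refine ⟨by simpa using htr, ?_, ?_, ?_, ?_⟩
    · simpa [vRow, vInd] using hrr
    · simpa using hrc
    · rw [show ({ st with hr := st.hr.insert (x : Int) PySem.Dict.empty } : VSt).hr
           = st.hr.insert (x : Int) PySem.Dict.empty from rfl,
          PySem.Dict.getD_insert_self]
      simpa [vRow] using vRepr_empty
    · intro j hj
      simpa using hhc j hj
  have hfold := vInner_fold mat N x N 0 _ (by omega) hstart
  have hrange : PySem.List.pyRange 0 n 1 = (List.range' 0 N).map (fun k : Nat => ((0 : Int) + (k : Int))) := by
    rw [PySem.List.pyRange_one, ← List.range_eq_range']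
    simp [hN]
  obtain ⟨h1, h2, h3, h4, h5⟩ := hfold
  unfold vRowStep
  rw [hrange]
  simp only [zero_add]
  refine ⟨?_, ?_, ?_, ?_⟩
  · rw [h1, if_pos hx, List.range_succ]
    simp
  · rw [h2, List.range_succ]
    simp
  · rw [h3]
    apply congrArg
    apply List.map_congr_left
    intro j hj
    rw [List.mem_range] at hj
    rw [if_pos hj]
  · intro j hj
    have := h5 j hj
    rwa [if_pos hj] at this

theorem vOuter_fold (mat : List (List Int)) (n : Int) (N : Nat) (hN : N = n.toNat) :
    ∀ (k x : Nat) (st : VSt), x + k = N → vInvR mat N st x →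
      vInvR mat N (((List.range' x k).map (fun j : Nat => (j : Int))).foldl (vRowStep mat n) st) N := by
  intro k
  induction k with
  | zero =>
    intro x st hxk hinv
    have : x = N := by omega
    subst this
    simpa using hinv
  | succ k ih =>
    intro x st hxk hinv
    rw [List.range'_succ, List.map_cons, List.foldl_cons]
    exact ih (x + 1) _ (by omega) (vRowStep_inv mat n N x st hN (by omega) hinv)

-- ofList strictly shrinks a list with a duplicate
theorem vLen_ofList_lt (l : List Int) (h : ¬ l.Nodup) : (PySem.Set.ofList l).length < l.length := by
  have h1 : (PySem.Set.ofList l).length = l.dedup.length := by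
    apply List.Perm.length_eq
    rw [List.perm_ext_iff_of_nodup (PySem.Set.nodup_ofList l) (List.nodup_dedup l)]
    intro a; rw [PySem.Set.mem_ofList, List.mem_dedup]
  have h2 : List.Sublist l.dedup l := List.dedup_sublist l
  have h3 : l.dedup ≠ l := fun e => h (e ▸ List.nodup_dedup l)
  rcases lt_or_eq_of_le h2.length_le with hlt | heq
  · omega
  · exact absurd (h2.eq_of_length heq) h3

-- B's set-size test computes the duplicate indicator on a length-n list
theorem vSetLen_eq_ind (l : List Int) (n : Int) (hlen : (l.length : Int) = n) :
    (if PySem.Set.len (PySem.Set.ofList l) < n then (1 : Int) else 0) = vInd l := by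
  unfold vInd
  by_cases hnd : l.Nodup
  · rw [PySem.Set.ofList_eq_self_of_nodup l hnd, if_pos hnd, if_neg]
    simp [PySem.Set.len, hlen]
  · rw [if_neg hnd, if_pos]
    have := vLen_ofList_lt l hnd
    simp only [PySem.Set.len]
    omega

-- ===== VERDICT (by name: the statement is the Claim_ definition above) =====
theorem vestigium_spec : Claim_equal_vestigium := by
  intro mat n _ _
  unfold Spec_vestigium vestigium vestigium_alt
  set N := n.toNat with hN
  have hrange : PySem.List.pyRange 0 n 1 = (List.range' 0 N).map (fun k : Nat => ((0 : Int) + (k : Int))) := by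
    rw [PySem.List.pyRange_one, ← List.range_eq_range']
    simp [hN]
  have hinit : vInvR mat N ⟨PySem.Dict.empty, PySem.Dict.empty, 0, 0, 0⟩ 0 := by
    refine ⟨by simp, by simp, ?_, ?_⟩
    · simp [vCol, vInd]
    · intro j hj
      rw [show (⟨PySem.Dict.empty, PySem.Dict.empty, 0, 0, 0⟩ : VSt).hc = PySem.Dict.empty from rfl,
          PySem.Dict.getD_empty]
      simpa [vCol] using vRepr_empty
  have hfin := vOuter_fold mat n N hN N 0 _ (by omega) hinit
  rw [hrange]
  simp only [zero_add]
  obtain ⟨h1, h2, h3, h4⟩ := hfin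
  rw [h1, h2, h3]
  simp only [List.map_map, ← List.range_eq_range', Function.comp_def]
  refine congrArg₂ _ rfl (congrArg₂ _ ?_ (congrArg₂ _ ?_ rfl))
  · -- repeatRow
    apply congrArg
    apply List.map_congr_left
    intro x hx
    rw [List.mem_range] at hx
    rw [← vSetLen_eq_ind (vRow mat x N) n (by simp [vRow]; omega)]
    simp only [vRow]
    rfl
  · -- repeatCol
    apply congrArg
    apply List.map_congr_left
    intro y hy
    rw [List.mem_range] at hy
    rw [← vSetLen_eq_ind (vCol mat y N) n (by simp [vCol]; omega)]
    simp only [vCol]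
    rfl
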